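-- pv_equiv track=rewrite | github.com/lynn-tao/AI | P1 Lynn Othello Pt. 2/Part 2/Lynn_OthelloAIP2.py | find_max_pos
-- ===== SOURCE A (Python) =====
-- def find_max_pos(max_posresults):
--     pos =  []
--     for item in max_posresults:
--         pos.append(item[0])
--     score = []
--     for item in max_posresults:
--         score.append(item[1])
--
--     max_score = score.index(max(score))
--     return pos[max_score]
-- ===== SOURCE B (Python) =====
-- def find_max_pos(max_posresults):
--     best_pos, best_score = max_posresults[0]
--     for pos, score in max_posresults[1:]:
--         if score > best_score:
--             best_pos, best_score = pos, score
--     return best_pos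
-- ===== Notes on version B (the rewrite author's own statement) =====
-- stated objective: simpler
-- what changed: Replaces the two list-building loops plus max() and index() scans with one pass that tracks the best (position, score), updating only on a strictly greater score so the first maximum wins.
import Mathlib
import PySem

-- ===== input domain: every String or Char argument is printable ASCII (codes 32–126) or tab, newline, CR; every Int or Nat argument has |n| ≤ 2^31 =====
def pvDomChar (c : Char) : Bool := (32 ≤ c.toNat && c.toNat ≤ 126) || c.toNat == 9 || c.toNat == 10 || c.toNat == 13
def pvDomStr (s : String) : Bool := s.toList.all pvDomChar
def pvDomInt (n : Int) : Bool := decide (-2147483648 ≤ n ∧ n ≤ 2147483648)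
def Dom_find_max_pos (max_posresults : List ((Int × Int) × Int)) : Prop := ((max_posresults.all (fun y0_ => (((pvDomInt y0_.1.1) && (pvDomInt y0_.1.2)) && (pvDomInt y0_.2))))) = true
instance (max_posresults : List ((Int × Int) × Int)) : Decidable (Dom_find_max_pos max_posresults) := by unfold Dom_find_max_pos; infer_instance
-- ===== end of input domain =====

-- B replaces A's two list-building loops plus max()+index() scans by one single-pass
-- loop tracking the best (position, score) with strict '>' (objective: simpler).


-- ===== PORT A =====
def find_max_pos (max_posresults : List ((Int × Int) × Int)) : Int × Int :=
  let pos := max_posresults.foldl (fun acc item => acc ++ [item.1]) []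
  let score := max_posresults.foldl (fun acc item => acc ++ [item.2]) []
  match PySem.List.max? score (fun y => y) with
  | none => (0, 0)          -- Python: ValueError on empty input; excluded by Pre_
  | some m =>
    match PySem.List.index? score m with
    | none => (0, 0)        -- unreachable: max is in the list
    | some i => (PySem.List.pyGet? pos (i : Int)).getD (0, 0)

-- ===== PORT B =====
def altLoop (bp : Int × Int) (bs : Int) : List ((Int × Int) × Int) → Int × Int
  | [] => bp
  | (p, s) :: rest => if bs < s then altLoop p s rest else altLoop bp bs rest

def find_max_pos_alt (max_posresults : List ((Int × Int) × Int)) : Int × Int :=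
  match max_posresults with
  | [] => (0, 0)            -- Python: IndexError on empty input; excluded by Pre_
  | (p, s) :: rest => altLoop p s rest

-- ===== PRECONDITION & SPEC =====
-- Pre_ excludes the empty list, on which A raises ValueError (and B raises IndexError).
def Pre_find_max_pos (max_posresults : List ((Int × Int) × Int)) : Prop :=
  max_posresults ≠ []
instance (max_posresults : List ((Int × Int) × Int)) : Decidable (Pre_find_max_pos max_posresults) := by unfold Pre_find_max_pos; infer_instance

def pvWitness_find_max_pos : (List ((Int × Int) × Int)) := [((1, 2), 3)]

def Spec_find_max_pos (max_posresults : List ((Int × Int) × Int)) (out : Int × Int) : Prop := out = find_max_pos_alt max_posresults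
instance (max_posresults : List ((Int × Int) × Int)) (out : Int × Int) : Decidable (Spec_find_max_pos max_posresults out) := by unfold Spec_find_max_pos; infer_instance

-- ===== CLAIM (what is proved, stated in full; the proofs are below) =====
def Claim_equal_find_max_pos : Prop := ∀ (max_posresults : List ((Int × Int) × Int)), Dom_find_max_pos max_posresults → Pre_find_max_pos max_posresults → Spec_find_max_pos max_posresults (find_max_pos max_posresults)

-- ===== LEMMAS AND PROOFS =====

-- A's append-building loop builds the map.
theorem foldl_snoc_map {α β : Type} (f : α → β) (l : List α) :
    ∀ acc : List β, l.foldl (fun a it => a ++ [f it]) acc = acc ++ l.map f := by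
  induction l with
  | nil => simp
  | cons x xs ih => intro acc; simp [List.foldl, ih]

theorem le_foldl_max (l : List Int) : ∀ s : Int, s ≤ l.foldl max s := by
  induction l with
  | nil => simp
  | cons x xs ih =>
    intro s
    exact le_trans (le_max_left s x) (ih (max s x))

theorem mem_foldl_max (l : List Int) :
    ∀ s : Int, l.foldl max s = s ∨ l.foldl max s ∈ l := by
  induction l with
  | nil => simp
  | cons x xs ih =>
    intro s
    rcases ih (max s x) with h | h
    · rcases max_choice s x with hm | hm <;> rw [List.foldl_cons, h, hm]
      · exact Or.inl rfl
      · exact Or.inr (List.mem_cons_self)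
    · exact Or.inr (List.mem_cons_of_mem _ h)

-- Key lemma: A on (p,s)::rest equals the single-pass loop started at (p,s).
theorem A_cons_eq_altLoop (rest : List ((Int × Int) × Int)) :
    ∀ p : Int × Int, ∀ s : Int, find_max_pos ((p, s) :: rest) = altLoop p s rest := by
  induction rest with
  | nil =>
    intro p s
    simp [find_max_pos, altLoop, PySem.List.max?_id_cons,
      PySem.List.pyGet?, PySem.List.pyIdx?]
  | cons head rest ih =>
    obtain ⟨q, t⟩ := head
    intro p s
    by_cases h : s < t
    · -- new record: A's max comes from (q,t)::rest and its index is shifted by one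
      rw [show altLoop p s (((q, t)) :: rest) = altLoop q t rest by
            simp [altLoop, h], ← ih q t]
      have hM : ((((q, t)) :: rest).map Prod.snd).foldl max s
          = ((rest).map Prod.snd).foldl max t := by
        simp [List.foldl_cons, max_eq_right (le_of_lt h)]
      have hst : s ≠ (rest.map Prod.snd).foldl max t :=
        ne_of_lt (lt_of_lt_of_le h (le_foldl_max _ t))
      simp only [find_max_pos, foldl_snoc_map, List.nil_append, List.cons_append,
        PySem.List.max?_id_cons, List.foldl_cons]
      rw [max_eq_right (le_of_lt h)]
      rw [PySem.List.index?_cons_of_ne _ hst]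
      cases hidx : PySem.List.index? (t :: rest.map Prod.snd)
          ((rest.map Prod.snd).foldl max t) with
      | none => simp
      | some i =>
        simp only [Option.map_some]
        have : ((i + 1 : Nat) : Int) = ((i : Nat) : Int) + 1 := by push_cast; ring
        simp [this, PySem.List.pyGet?_natCast]
    · -- t ≤ s: A's max and B's best stay as for (p,s)::rest
      rw [show altLoop p s (((q, t)) :: rest) = altLoop p s rest by
            simp [altLoop, h], ← ih p s]
      have hts : t ≤ s := le_of_not_gt h
      have hM : ((((q, t)) :: rest).map Prod.snd).foldl max s
          = ((rest).map Prod.snd).foldl max s := by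
        simp [List.foldl_cons, max_eq_left hts]
      simp only [find_max_pos, foldl_snoc_map, List.nil_append, List.cons_append, List.foldl_cons]
      rw [PySem.List.max?_id_cons, PySem.List.max?_id_cons, List.foldl_cons,
        max_eq_left hts]
      set M := (rest.map Prod.snd).foldl max s with hMdef
      by_cases hsM : s = M
      · rw [← hsM]
        dsimp only
        rw [PySem.List.index?_cons_self, PySem.List.index?_cons_self]
        have hc : (0:Int) ≤ (rest.length : Int) + 1 := by positivity
        simp [PySem.List.pyGet?, PySem.List.pyIdx?, hc]
      · have hsM' : s < M := lt_of_le_of_ne (le_foldl_max _ s) hsM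
        have htM : t ≠ M := ne_of_lt (lt_of_le_of_lt hts hsM')
        have hMem : M ∈ rest.map Prod.snd := by
          rcases mem_foldl_max (rest.map Prod.snd) s with h' | h'
          · exact absurd h'.symm hsM
          · exact h'
        dsimp only
        rw [PySem.List.index?_cons_of_ne _ hsM, PySem.List.index?_cons_of_ne _ htM,
          PySem.List.index?_cons_of_ne _ hsM]
        cases hidx : PySem.List.index? (rest.map Prod.snd) M with
        | none =>
          exact absurd ((PySem.List.index?_isSome_iff _ _).mpr hMem) (by rw [hidx]; simp)
        | some i =>
          simp only [Option.map_some]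
          simp only [PySem.List.pyGet?_natCast]
          simp

-- ===== VERDICT (by name: the statement is the Claim_ definition above) =====
theorem find_max_pos_spec : Claim_equal_find_max_pos := by
  intro l _ hpre
  unfold Spec_find_max_pos
  match l with
  | [] => exact absurd rfl hpre
  | (p, s) :: rest =>
    rw [A_cons_eq_altLoop rest p s]
    rfl
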